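-- pv_equiv track=rewrite | github.com/shankarnat/Python-Hacks | streval.py | findmaxstring
-- ===== SOURCE A (Python) =====
-- def alter(tupitr):
--     for i in range (0, len(tupitr) -1):
--         if (tupitr[i] == tupitr[i+1]):
--             return False
--     return True
--
-- def findmaxstring(listop):
--     dict1 = {}
--     for tupitr in listop:
--         if (alter(tupitr[0])):
--             dict1[tupitr[0]] = len(tupitr[0])
--     max =  0
--     oplist = []
--     for key,values in dict1.items():
--         if max <= values:
--             max = values
--             oplist.append((key, max))
--     return max
-- ===== SOURCE B (Python) =====
-- def findmaxstring(listop):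
--     best = 0
--     for s, _ in listop:
--         if all(a != b for a, b in zip(s, s[1:])) and len(s) > best:
--             best = len(s)
--     return best
-- ===== Notes on version B (the rewrite author's own statement) =====
-- stated objective: simpler
-- what changed: A builds a dict from passing strings to their lengths and then rescans the dict items with a (max, oplist) accumulator; B is a single pass over listop keeping a running maximum, with the adjacency test written as all(a != b for a, b in zip(s, s[1:])) instead of an indexed range loop.
import Mathlib
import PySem

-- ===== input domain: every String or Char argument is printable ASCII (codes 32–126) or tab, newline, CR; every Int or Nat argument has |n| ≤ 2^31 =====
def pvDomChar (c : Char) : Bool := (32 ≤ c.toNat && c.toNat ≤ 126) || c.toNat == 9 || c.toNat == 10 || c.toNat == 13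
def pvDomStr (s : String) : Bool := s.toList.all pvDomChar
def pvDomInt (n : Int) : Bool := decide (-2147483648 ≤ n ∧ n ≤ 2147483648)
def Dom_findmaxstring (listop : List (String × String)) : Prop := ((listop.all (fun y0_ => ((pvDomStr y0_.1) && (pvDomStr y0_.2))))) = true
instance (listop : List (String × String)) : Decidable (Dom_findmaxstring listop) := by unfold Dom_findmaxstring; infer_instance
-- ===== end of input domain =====

-- B replaces A's build-a-dict-then-rescan decomposition by a single pass keeping a running maximum (objective: simpler).

-- ===== PORT A =====
-- A's helper `alter`: indexed loop over range(0, len-1) with early return False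
def alterAux (cs : List Char) : List Int → Bool
  | [] => true
  | i :: rest =>
      if PySem.List.pyGet? cs i == PySem.List.pyGet? cs (i + 1) then false
      else alterAux cs rest

def alter (s : String) : Bool :=
  alterAux s.toList (PySem.List.pyRange 0 (PySem.Str.len s - 1) 1)

def findmaxstring (listop : List (String × String)) : Int :=
  (((listop.foldl
      (fun d tupitr => if alter tupitr.1 then d.insert tupitr.1 (PySem.Str.len tupitr.1) else d)
      (PySem.Dict.empty : PySem.Dict String Int)).items).foldl
    (fun (st : Int × List (String × Int)) kv =>
      if st.1 ≤ kv.2 then (kv.2, st.2 ++ [(kv.1, kv.2)]) else st)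
    (0, [])).1

-- ===== PORT B =====
-- B's helper: all(a != b for a, b in zip(s, s[1:]))
def chk (s : String) : Bool :=
  (s.toList.zip s.toList.tail).all (fun p => !(p.1 == p.2))

def findmaxstring_alt (listop : List (String × String)) : Int :=
  listop.foldl
    (fun best t => if chk t.1 ∧ PySem.Str.len t.1 > best then PySem.Str.len t.1 else best)
    0

-- ===== PRECONDITION & SPEC =====
def Spec_findmaxstring (listop : List (String × String)) (out : Int) : Prop := out = findmaxstring_alt listop
instance (listop : List (String × String)) (out : Int) : Decidable (Spec_findmaxstring listop out) := by unfold Spec_findmaxstring; infer_instance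

-- ===== CLAIM (what is proved, stated in full; the proofs are below) =====
def Claim_equal_findmaxstring : Prop := ∀ (listop : List (String × String)), Dom_findmaxstring listop → Spec_findmaxstring listop (findmaxstring listop)

-- ===== LEMMAS AND PROOFS =====

-- chk over the char list
def chkL (cs : List Char) : Bool := (cs.zip cs.tail).all (fun p => !(p.1 == p.2))

lemma chkL_cons_cons (a b : Char) (t : List Char) :
    chkL (a :: b :: t) = ((!(a == b)) && chkL (b :: t)) := by
  simp [chkL]

-- A's indexed adjacency loop from index k equals chkL on the suffix
lemma alterAux_eq (m : Nat) : ∀ (cs : List Char) (k : Nat), cs.length - k ≤ m →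
    alterAux cs (PySem.List.pyRange (k : Int) ((cs.length : Int) - 1) 1) = chkL (cs.drop k) := by
  induction m with
  | zero =>
      intro cs k h
      have hk : cs.length ≤ k := by omega
      rw [PySem.List.pyRange_one_eq_nil (by omega)]
      have : cs.drop k = [] := List.drop_eq_nil_of_le hk
      simp [alterAux, this, chkL]
  | succ m ih =>
      intro cs k h
      by_cases hlt : k + 1 < cs.length
      · rw [PySem.List.pyRange_one_cons (by omega)]
        have hk : k < cs.length := by omega
        have hget1 : PySem.List.pyGet? cs (k : Int) = some cs[k] :=
          PySem.List.pyGet?_ofNat cs k hk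
        have hget2 : PySem.List.pyGet? cs ((k : Int) + 1) = some cs[k+1] := by
          have : ((k : Int) + 1) = ((k + 1 : Nat) : Int) := by push_cast; ring
          rw [this]
          exact PySem.List.pyGet?_ofNat cs (k+1) hlt
        have hdrop : cs.drop k = cs[k] :: cs.drop (k + 1) :=
          List.drop_eq_getElem_cons hk
        have hdrop2 : cs.drop (k + 1) = cs[k+1] :: cs.drop (k + 2) :=
          List.drop_eq_getElem_cons hlt
        have hcast : (k : Int) + 1 = ((k + 1 : Nat) : Int) := by push_cast; ring
        rw [show alterAux cs ((k : Int) :: PySem.List.pyRange ((k : Int) + 1) ((cs.length : Int) - 1) 1)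
              = if PySem.List.pyGet? cs (k : Int) == PySem.List.pyGet? cs ((k : Int) + 1) then false
                else alterAux cs (PySem.List.pyRange ((k : Int) + 1) ((cs.length : Int) - 1) 1) from rfl,
            hget1, hget2, hcast, ih cs (k + 1) (by omega), hdrop, hdrop2, chkL_cons_cons, ← hdrop2]
        by_cases hab : cs[k] = cs[k+1] <;> simp [hab]
      · rw [PySem.List.pyRange_one_eq_nil (by omega)]
        rcases Nat.lt_or_ge k cs.length with hk | hk
        · have hd : cs.drop k = [cs[k]] := by
            rw [List.drop_eq_getElem_cons hk]
            have : cs.drop (k + 1) = [] := List.drop_eq_nil_of_le (by omega)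
            rw [this]
          simp [alterAux, hd, chkL]
        · have : cs.drop k = [] := List.drop_eq_nil_of_le hk
          simp [alterAux, this, chkL]

lemma alter_eq_chk (s : String) : alter s = chk s := by
  have h := alterAux_eq s.toList.length s.toList 0 (by omega)
  simpa [alter, chk, chkL, PySem.Str.len_eq] using h

-- the first component of A's second loop is a running max of the values
lemma fold_fst (items : List (String × Int)) :
    ∀ (m : Int) (acc : List (String × Int)),
    (items.foldl (fun (st : Int × List (String × Int)) kv =>
        if st.1 ≤ kv.2 then (kv.2, st.2 ++ [(kv.1, kv.2)]) else st) (m, acc)).1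
      = items.foldl (fun m kv => max m kv.2) m := by
  induction items with
  | nil => intro m acc; rfl
  | cons kv rest ih =>
      intro m acc
      by_cases h : m ≤ kv.2
      · simp only [List.foldl_cons, if_pos h, ih, max_eq_right h]
      · simp only [List.foldl_cons, if_neg h, ih, max_eq_left (by omega : kv.2 ≤ m)]

-- running max only depends on the set of elements
lemma foldl_max_le_iff (l : List Int) : ∀ (a c : Int),
    l.foldl max a ≤ c ↔ a ≤ c ∧ ∀ x ∈ l, x ≤ c := by
  induction l with
  | nil => intro a c; simp
  | cons x t ih =>
      intro a c
      simp only [List.foldl_cons, ih, max_le_iff, List.mem_cons]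
      constructor
      · rintro ⟨⟨h1, h2⟩, h3⟩; exact ⟨h1, fun y hy => by rcases hy with rfl | hy; exact h2; exact h3 y hy⟩
      · rintro ⟨h1, h2⟩; exact ⟨⟨h1, h2 x (Or.inl rfl)⟩, fun y hy => h2 y (Or.inr hy)⟩

lemma foldl_max_subset (a : Int) (l1 l2 : List Int)
    (h12 : ∀ x ∈ l1, x ∈ l2) (h21 : ∀ x ∈ l2, x ∈ l1) :
    l1.foldl max a = l2.foldl max a := by
  have k1 := (foldl_max_le_iff l1 a (l1.foldl max a)).mp le_rfl
  have k2 := (foldl_max_le_iff l2 a (l2.foldl max a)).mp le_rfl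
  apply le_antisymm
  · exact (foldl_max_le_iff l1 a _).mpr ⟨k2.1, fun x hx => k2.2 x (h12 x hx)⟩
  · exact (foldl_max_le_iff l2 a _).mpr ⟨k1.1, fun x hx => k1.2 x (h21 x hx)⟩

-- the dict built by the filtered insert loop maps each inserted key to its length
lemma getD_build (F : List (String × String)) :
    ∀ (d : PySem.Dict String Int) (k : String),
    (F.foldl (fun d t => d.insert t.1 (PySem.Str.len t.1)) d).getD k 0
      = if k ∈ F.map Prod.fst then PySem.Str.len k else d.getD k 0 := by
  induction F with
  | nil => intro d k; simp
  | cons t rest ih =>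
      intro d k
      simp only [List.foldl_cons, List.map_cons, List.mem_cons, ih]
      by_cases h1 : k ∈ rest.map Prod.fst
      · simp [h1]
      · by_cases h2 : k = t.1
        · subst h2; simp [h1, PySem.Dict.getD_insert_self]
        · simp [h1, h2, PySem.Dict.getD_insert]

theorem findmaxstring_spec_aux (listop : List (String × String)) :
    findmaxstring listop = findmaxstring_alt listop := by
  have hstep : (fun (best : Int) (t : String × String) =>
        if chk t.1 ∧ PySem.Str.len t.1 > best then PySem.Str.len t.1 else best)
      = (fun best t => if (fun t : String × String => alter t.1) t
          then (fun (best : Int) (t : String × String) => max best (PySem.Str.len t.1)) best t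
          else best) := by
    funext best t
    rw [← alter_eq_chk]
    by_cases ha : alter t.1 = true
    · simp only [ha, true_and, if_true]
      rw [max_def]; split_ifs <;> simp_all <;> omega
    · simp [ha]
  unfold findmaxstring findmaxstring_alt
  rw [fold_fst, hstep, PySem.List.foldl_ite_eq_foldl_filter,
      PySem.List.foldl_ite_eq_foldl_filter]
  simp only [Bool.decide_eq_true]
  set F := listop.filter (fun t : String × String => alter t.1) with hF
  set d := F.foldl (fun (d : PySem.Dict String Int) t => d.insert t.1 (PySem.Str.len t.1))
      (PySem.Dict.empty : PySem.Dict String Int) with hd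
  have hnodup : d.keys.Nodup := by
    rw [hd]
    exact PySem.Dict.nodup_keys_foldl_insert_key F Prod.fst _ _ (by simp)
  have hkeys : ∀ k, k ∈ d.keys ↔ ∃ t ∈ F, t.1 = k := by
    intro k
    rw [hd, PySem.Dict.keys_foldl_insert_key F Prod.fst, PySem.Set.mem_update]
    simp [List.mem_map]
  have hval : ∀ k ∈ d.keys, d.getD k 0 = PySem.Str.len k := by
    intro k hk
    obtain ⟨t, ht, htk⟩ := (hkeys k).mp hk
    rw [hd, getD_build, if_pos (List.mem_map.mpr ⟨t, ht, htk⟩)]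
  have hA : d.items.foldl (fun m kv => max m kv.2) 0
      = (d.keys.map PySem.Str.len).foldl max 0 := by
    rw [PySem.Dict.items_eq_map_keys d hnodup 0, List.foldl_map, List.foldl_map]
    exact PySem.List.foldl_congr_mem d.keys _ _ 0
      (fun m k hk => by rw [hval k hk])
  have hB : F.foldl (fun (best : Int) (t : String × String) => max best (PySem.Str.len t.1)) 0
      = ((F.map Prod.fst).map PySem.Str.len).foldl max 0 := by
    rw [List.foldl_map, List.foldl_map]
  rw [hA, hB]
  apply foldl_max_subset
  · intro x hx
    simp only [List.mem_map] at hx ⊢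
    obtain ⟨k, hk, rfl⟩ := hx
    exact ⟨k, (hkeys k).mp hk, rfl⟩
  · intro x hx
    simp only [List.mem_map] at hx ⊢
    obtain ⟨k, hk, rfl⟩ := hx
    exact ⟨k, (hkeys k).mpr hk, rfl⟩

-- ===== VERDICT (by name: the statement is the Claim_ definition above) =====
theorem findmaxstring_spec : Claim_equal_findmaxstring := by
  intro listop _
  exact findmaxstring_spec_aux listop
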